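-- pv_equiv track=rewrite | github.com/joaocarvoli/nlp-symbolic-solution | symbolic/src/symbolic/utils/sentiment.py | context_flags_with_direction
-- ===== SOURCE A (Python) =====
-- def context_flags_with_direction(phrase, target_word, element):
--     results = []
--     for index, word in enumerate(phrase):
--         if word == target_word:
--             before_indices = range(max(0, index - 2), index)
--             after_indices = range(index + 1, min(len(phrase), index + 3))
--
--             direction = None
--             found = False
--
--             # Check before
--             for i in before_indices:
--                 if phrase[i] == element:
--                     found = True
--                     direction = "before"
--                     break
--
--             # Check after only if not already found
--             if not found:
--                 for i in after_indices:
--                     if phrase[i] == element: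
--                         found = True
--                         direction = "after"
--                         break
--
--             results.append((found, direction))
--     return results
-- ===== SOURCE B (Python) =====
-- def context_flags_with_direction(phrase, target_word, element):
--     n = len(phrase)
--     before = [False] * n
--     after = [False] * n
--     for j, w in enumerate(phrase):
--         if w == element:
--             for k in (j + 1, j + 2):
--                 if k < n:
--                     before[k] = True
--             for k in (j - 1, j - 2):
--                 if k >= 0:
--                     after[k] = True
--     return [
--         (True, "before") if before[i] else (True, "after") if after[i] else (False, None)
--         for i, w in enumerate(phrase)
--         if w == target_word
--     ]
-- ===== Notes on version B (the rewrite author's own statement) =====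
-- stated objective: alternative
-- what changed: B inverts the data flow: instead of scanning a +/-2 window around each target occurrence, a single marking pass lets every element occurrence scatter marks into two boolean arrays (indices j+1,j+2 become before-satisfied, j-1,j-2 after-satisfied), and each target occurrence then just reads its own cell; no window or neighbor lookup is ever performed.
import Mathlib
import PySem

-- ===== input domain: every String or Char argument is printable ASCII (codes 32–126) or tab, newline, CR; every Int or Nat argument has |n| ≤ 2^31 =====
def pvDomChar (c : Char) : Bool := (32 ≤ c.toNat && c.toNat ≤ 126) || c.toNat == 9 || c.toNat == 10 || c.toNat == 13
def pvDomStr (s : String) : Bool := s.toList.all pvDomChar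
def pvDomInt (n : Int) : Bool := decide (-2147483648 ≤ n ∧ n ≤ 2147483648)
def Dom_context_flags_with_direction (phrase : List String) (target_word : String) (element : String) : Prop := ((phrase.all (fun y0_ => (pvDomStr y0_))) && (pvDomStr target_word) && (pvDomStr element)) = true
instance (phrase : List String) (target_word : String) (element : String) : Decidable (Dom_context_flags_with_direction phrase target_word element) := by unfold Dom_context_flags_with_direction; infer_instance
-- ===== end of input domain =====

-- B replaces A's per-target window scans by one scatter pass in which each element occurrence
-- marks its neighbours in two boolean arrays, read back per target (objective: alternative).

-- ===== PORT A =====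
-- inner 'for i in …: if phrase[i] == element: … break' loop; every scanned index is in range,
-- so pyGet? is always `some` here and the `some element` test is exact.
def cfScan (phrase : List String) (element : String) : List Int → Bool
  | [] => false
  | i :: rest =>
    if PySem.List.pyGet? phrase i = some element then true else cfScan phrase element rest

def context_flags_with_direction (phrase : List String) (target_word : String) (element : String) : List (Bool × Option String) :=
  (PySem.List.enumerate phrase).foldl (fun results p =>
    if p.2 = target_word then
      let before_indices := PySem.List.pyRange (max 0 (p.1 - 2)) p.1 1
      let after_indices := PySem.List.pyRange (p.1 + 1) (min (PySem.List.len phrase) (p.1 + 3)) 1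
      if cfScan phrase element before_indices then results ++ [(true, some "before")]
      else if cfScan phrase element after_indices then results ++ [(true, some "after")]
      else results ++ [(false, none)]
    else results) []

-- ===== PORT B =====
-- 'for k in (j+1, j+2): if k < n: before[k] = True' — the written index is nonnegative and,
-- under the guard, within range, so '.set k.toNat' is exactly Python's in-range list assignment.
def cfMarkFwd (n : Int) (bef : List Bool) (j : Int) : List Bool :=
  let bef1 := if j + 1 < n then bef.set (j + 1).toNat true else bef
  if j + 2 < n then bef1.set (j + 2).toNat true else bef1

-- 'for k in (j-1, j-2): if k >= 0: after[k] = True' — guarded index is nonnegative and < n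
-- since j < n, so '.set k.toNat' is exact here too.
def cfMarkBwd (aft : List Bool) (j : Int) : List Bool :=
  let aft1 := if 0 ≤ j - 1 then aft.set (j - 1).toNat true else aft
  if 0 ≤ j - 2 then aft1.set (j - 2).toNat true else aft1

-- loop body of B's marking pass
def cfStep (n : Int) (element : String) (s : List Bool × List Bool) (p : Int × String) : List Bool × List Bool :=
  if p.2 = element then (cfMarkFwd n s.1 p.1, cfMarkBwd s.2 p.1) else s

def context_flags_with_direction_alt (phrase : List String) (target_word : String) (element : String) : List (Bool × Option String) :=
  let n := PySem.List.len phrase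
  let marks := (PySem.List.enumerate phrase).foldl (cfStep n element)
    (List.replicate n.toNat false, List.replicate n.toNat false)
  -- 'before[i]' / 'after[i]' with i from enumerate is always in range; '.getD i.toNat false' is exact
  ((PySem.List.enumerate phrase).filter (fun p => p.2 = target_word)).map
    (fun p => if marks.1.getD p.1.toNat false then (true, some "before")
              else if marks.2.getD p.1.toNat false then (true, some "after")
              else (false, none))

-- ===== PRECONDITION & SPEC =====
def Spec_context_flags_with_direction (phrase : List String) (target_word : String) (element : String) (out : List (Bool × Option String)) : Prop := out = context_flags_with_direction_alt phrase target_word element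
instance (phrase : List String) (target_word : String) (element : String) (out : List (Bool × Option String)) : Decidable (Spec_context_flags_with_direction phrase target_word element out) := by unfold Spec_context_flags_with_direction; infer_instance

-- ===== CLAIM (what is proved, stated in full; the proofs are below) =====
def Claim_equal_context_flags_with_direction : Prop := ∀ (phrase : List String) (target_word : String) (element : String), Dom_context_flags_with_direction phrase target_word element → Spec_context_flags_with_direction phrase target_word element (context_flags_with_direction phrase target_word element)

-- ===== LEMMAS AND PROOFS =====

-- the set of element positions, used as the common description of both sides
def cfPos (phrase : List String) (element : String) : PySem.Set Int :=
  PySem.Set.ofList ((PySem.List.enumerate phrase).filterMap (fun p => if p.2 = element then some p.1 else none))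

def cfHit (phrase : List String) (element : String) (i : Int) : Bool :=
  decide (PySem.List.pyGet? phrase i = some element)

def cfFlag (positions : PySem.Set Int) (i : Int) : Bool × Option String :=
  if PySem.Set.contains positions (i - 2) || PySem.Set.contains positions (i - 1) then (true, some "before")
  else if PySem.Set.contains positions (i + 1) || PySem.Set.contains positions (i + 2) then (true, some "after")
  else (false, none)

lemma mem_cfPos (phrase : List String) (element : String) (j : Int) :
    j ∈ cfPos phrase element ↔ ∃ k : Nat, ∃ h : k < phrase.length, (j : Int) = k ∧ phrase[k] = element := by
  unfold cfPos
  rw [PySem.Set.mem_ofList, List.mem_filterMap]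
  constructor
  · rintro ⟨p, hp, hf⟩
    rw [PySem.List.mem_enumerate_iff] at hp
    obtain ⟨k, hk, rfl⟩ := hp
    by_cases he : phrase[k] = element
    · simp [he] at hf; exact ⟨k, hk, by omega, he⟩
    · simp [he] at hf
  · rintro ⟨k, hk, rfl, he⟩
    refine ⟨((k : Int), phrase[k]), ?_, by simp [he]⟩
    rw [PySem.List.mem_enumerate_iff]
    exact ⟨k, hk, by simp⟩

lemma contains_cfPos_eq (phrase : List String) (element : String) (k : Nat) (hk : k < phrase.length) :
    PySem.Set.contains (cfPos phrase element) (k : Int) = cfHit phrase element (k : Int) := by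
  unfold cfHit
  rw [Bool.eq_iff_iff, PySem.Set.contains_iff, mem_cfPos]
  rw [PySem.List.pyGet?_natCast]
  constructor
  · rintro ⟨m, hm, hme, he⟩
    have : m = k := by omega
    subst this
    simp [List.getElem?_eq_getElem hm, he]
  · intro h
    rw [decide_eq_true_iff, List.getElem?_eq_some_iff] at h
    obtain ⟨h1, h2⟩ := h
    exact ⟨k, hk, rfl, h2⟩

lemma contains_cfPos_false (phrase : List String) (element : String) (j : Int)
    (h : j < 0 ∨ (phrase.length : Int) ≤ j) :
    PySem.Set.contains (cfPos phrase element) j = false := by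
  rw [← Bool.not_eq_true, PySem.Set.contains_iff, mem_cfPos]
  rintro ⟨k, hk, rfl, -⟩
  omega

lemma cfScan_eq_any (phrase : List String) (element : String) (l : List Int) :
    cfScan phrase element l = l.any (cfHit phrase element) := by
  induction l with
  | nil => rfl
  | cons i rest ih =>
    simp only [cfScan, List.any_cons, cfHit]
    split_ifs with h <;> simp [h, ih]

-- the "before" window scan equals the two element-position membership tests
lemma before_eq (phrase : List String) (element : String) (k : Nat) (hk : k < phrase.length) :
    cfScan phrase element (PySem.List.pyRange (max 0 ((k : Int) - 2)) (k : Int) 1)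
      = (PySem.Set.contains (cfPos phrase element) ((k : Int) - 2)
         || PySem.Set.contains (cfPos phrase element) ((k : Int) - 1)) := by
  rw [cfScan_eq_any]
  match k with
  | 0 =>
    rw [PySem.List.pyRange_one_eq_nil (by norm_num)]
    rw [contains_cfPos_false phrase element _ (by left; norm_num)]
    rw [contains_cfPos_false phrase element _ (by left; norm_num)]
    rfl
  | 1 =>
    rw [show max 0 (((1:Nat) : Int) - 2) = 0 from by norm_num]
    rw [PySem.List.pyRange_one_cons (by norm_num), PySem.List.pyRange_one_eq_nil (by norm_num)]
    rw [contains_cfPos_false phrase element (((1:Nat) : Int) - 2) (by left; norm_num)]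
    rw [show ((1:Nat) : Int) - 1 = ((0 : Nat) : Int) from by norm_num]
    rw [contains_cfPos_eq phrase element 0 (by omega)]
    simp
  | (m + 2) =>
    rw [show max 0 (((m + 2 : Nat) : Int) - 2) = ((m : Nat) : Int) from by push_cast; omega]
    rw [PySem.List.pyRange_one_cons (by push_cast; omega)]
    rw [PySem.List.pyRange_one_cons (by push_cast; omega)]
    rw [PySem.List.pyRange_one_eq_nil (by push_cast; omega)]
    rw [show ((m + 2 : Nat) : Int) - 2 = ((m : Nat) : Int) from by push_cast; omega]
    rw [show ((m + 2 : Nat) : Int) - 1 = ((m + 1 : Nat) : Int) from by push_cast; omega]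
    rw [show ((m : Nat) : Int) + 1 = ((m + 1 : Nat) : Int) from by push_cast; omega]
    rw [contains_cfPos_eq phrase element m (by omega)]
    rw [contains_cfPos_eq phrase element (m + 1) (by omega)]
    simp

-- the "after" window scan equals the two element-position membership tests
lemma after_eq (phrase : List String) (element : String) (k : Nat) (hk : k < phrase.length) :
    cfScan phrase element (PySem.List.pyRange ((k : Int) + 1) (min (PySem.List.len phrase) ((k : Int) + 3)) 1)
      = (PySem.Set.contains (cfPos phrase element) ((k : Int) + 1)
         || PySem.Set.contains (cfPos phrase element) ((k : Int) + 2)) := by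
  rw [cfScan_eq_any, PySem.List.len_eq]
  have e1 : ((k : Int) + 1) = ((k + 1 : Nat) : Int) := by push_cast; omega
  have e2 : ((k : Int) + 2) = ((k + 2 : Nat) : Int) := by push_cast; omega
  rcases Nat.lt_or_ge (k + 2) phrase.length with h | h
  · have hmin : min ((phrase.length : Int)) ((k : Int) + 3) = (k : Int) + 3 := by omega
    rw [hmin]
    rw [PySem.List.pyRange_one_cons (by omega), PySem.List.pyRange_one_cons (by omega),
        PySem.List.pyRange_one_eq_nil (by omega)]
    rw [show (k : Int) + 1 + 1 = (k : Int) + 2 by omega]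
    rw [e1, e2, contains_cfPos_eq phrase element (k + 1) (by omega),
        contains_cfPos_eq phrase element (k + 2) (by omega)]
    simp
  · rcases Nat.lt_or_ge (k + 1) phrase.length with h1 | h1
    · have hmin : min ((phrase.length : Int)) ((k : Int) + 3) = (phrase.length : Int) := by omega
      rw [hmin]
      have hlen : (phrase.length : Int) = (k : Int) + 2 := by omega
      rw [hlen]
      rw [PySem.List.pyRange_one_cons (by omega), PySem.List.pyRange_one_eq_nil (by omega)]
      rw [e1, e2, contains_cfPos_eq phrase element (k + 1) (by omega),
          contains_cfPos_false phrase element _ (by right; push_cast; omega)]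
      simp
    · have hmin : min ((phrase.length : Int)) ((k : Int) + 3) = (phrase.length : Int) := by omega
      rw [hmin]
      rw [PySem.List.pyRange_one_eq_nil (by omega)]
      rw [e1, e2, contains_cfPos_false phrase element _ (by right; push_cast; omega),
          contains_cfPos_false phrase element _ (by right; push_cast; omega)]
      rfl

-- A's per-element emitted value
def cfEmitA (phrase : List String) (target_word : String) (element : String) (p : Int × String) : Option (Bool × Option String) :=
  if p.2 = target_word then
    if cfScan phrase element (PySem.List.pyRange (max 0 (p.1 - 2)) p.1 1) then some (true, some "before")
    else if cfScan phrase element (PySem.List.pyRange (p.1 + 1) (min (PySem.List.len phrase) (p.1 + 3)) 1) then some (true, some "after")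
    else some (false, none)
  else none

lemma foldl_emit {α β : Type} (F : α → Option β) (l : List α) (acc : List β) :
    l.foldl (fun acc x => acc ++ (F x).toList) acc = acc ++ l.filterMap F := by
  induction l generalizing acc with
  | nil => simp
  | cons x xs ih =>
    simp only [List.foldl_cons, List.filterMap_cons, ih]
    cases F x <;> simp

lemma A_eq_filterMap (phrase : List String) (target_word : String) (element : String) :
    context_flags_with_direction phrase target_word element
      = (PySem.List.enumerate phrase).filterMap (cfEmitA phrase target_word element) := by
  unfold context_flags_with_direction
  rw [PySem.List.foldl_congr_mem
      (g := fun acc p => acc ++ ((cfEmitA phrase target_word element p).toList))]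
  · rw [foldl_emit]; simp
  · intro acc p _
    unfold cfEmitA
    by_cases h1 : p.2 = target_word
    · rw [if_pos h1, if_pos h1]
      by_cases h2 : cfScan phrase element (PySem.List.pyRange (max 0 (p.1 - 2)) p.1 1) = true
      · rw [if_pos h2, if_pos h2]; rfl
      · rw [if_neg h2, if_neg h2]
        by_cases h3 : cfScan phrase element (PySem.List.pyRange (p.1 + 1) (min (PySem.List.len phrase) (p.1 + 3)) 1) = true
        · rw [if_pos h3, if_pos h3]; rfl
        · rw [if_neg h3, if_neg h3]; rfl
    · rw [if_neg h1, if_neg h1]; simp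

-- B's per-element emitted value, phrased through cfPos
def cfEmitB (phrase : List String) (target_word : String) (element : String) (p : Int × String) : Option (Bool × Option String) :=
  if p.2 = target_word then some (cfFlag (cfPos phrase element) p.1) else none

lemma filterMap_cfEmitB (phrase : List String) (target_word : String) (element : String) (l : List (Int × String)) :
    l.filterMap (cfEmitB phrase target_word element)
      = (l.filter (fun p => p.2 = target_word)).map (fun p => cfFlag (cfPos phrase element) p.1) := by
  induction l with
  | nil => rfl
  | cons x xs ih =>
    rw [List.filterMap_cons, List.filter_cons]
    by_cases h : x.2 = target_word
    · rw [show cfEmitB phrase target_word element x = some (cfFlag (cfPos phrase element) x.1) from by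
        simp [cfEmitB, h]]
      simp [h, ih]
    · rw [show cfEmitB phrase target_word element x = none from by simp [cfEmitB, h]]
      simp [h, ih]

lemma emitA_eq (phrase : List String) (target_word : String) (element : String)
    (p : Int × String) (hp : p ∈ PySem.List.enumerate phrase) :
    cfEmitA phrase target_word element p = cfEmitB phrase target_word element p := by
  rw [PySem.List.mem_enumerate_iff] at hp
  obtain ⟨k, hk, rfl⟩ := hp
  simp only [cfEmitA, cfEmitB, cfFlag, zero_add]
  by_cases ht : phrase[k] = target_word
  · simp only [ht, if_pos trivial]
    rw [before_eq phrase element k hk, after_eq phrase element k hk]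
    split_ifs <;> simp_all
  · simp [ht]

-- ===== characterisation of B's marking pass =====

lemma getD_set_true (l : List Bool) (k i : Nat) :
    (l.set k true).getD i false = if k = i ∧ k < l.length then true else l.getD i false := by
  rw [List.getD_eq_getElem?_getD, List.getD_eq_getElem?_getD, List.getElem?_set]
  split_ifs with h1 h2 <;> simp_all
  omega

lemma getD_set_true' (l : List Bool) (j : Int) (i : Nat) (hj : 0 ≤ j) (hi : i < l.length) :
    (l.set j.toNat true).getD i false = (l.getD i false || decide (j = (i : Int))) := by
  rw [getD_set_true]
  by_cases h : j = (i : Int)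
  · have hc : j.toNat = i ∧ j.toNat < l.length := by omega
    rw [if_pos hc]
    simp [h]
  · have hc : ¬(j.toNat = i ∧ j.toNat < l.length) := by omega
    rw [if_neg hc]
    simp [h]

lemma length_cfMarkFwd (n : Int) (bef : List Bool) (j : Int) :
    (cfMarkFwd n bef j).length = bef.length := by
  unfold cfMarkFwd; dsimp only; split_ifs <;> simp

lemma length_cfMarkBwd (aft : List Bool) (j : Int) :
    (cfMarkBwd aft j).length = aft.length := by
  unfold cfMarkBwd; dsimp only; split_ifs <;> simp

lemma cfMarkFwd_getD (n : Int) (bef : List Bool) (j : Int) (i : Nat)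
    (hn : n = (bef.length : Int)) (hi : i < bef.length) (hj : 0 ≤ j) :
    (cfMarkFwd n bef j).getD i false
      = (bef.getD i false || (decide (j + 1 = (i : Int)) || decide (j + 2 = (i : Int)))) := by
  unfold cfMarkFwd; dsimp only
  by_cases g1 : j + 1 < n <;> by_cases g2 : j + 2 < n
  · rw [if_pos g2, if_pos g1,
      getD_set_true' _ _ _ (by omega) (by rw [List.length_set]; exact hi),
      getD_set_true' _ _ _ (by omega) hi, Bool.or_assoc]
  · rw [if_neg g2, if_pos g1, getD_set_true' _ _ _ (by omega) hi]
    have : decide (j + 2 = (i : Int)) = false := by simp; omega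
    rw [this, Bool.or_false]
  · omega
  · rw [if_neg g2, if_neg g1]
    have h1 : decide (j + 1 = (i : Int)) = false := by simp; omega
    have h2 : decide (j + 2 = (i : Int)) = false := by simp; omega
    rw [h1, h2, Bool.or_false, Bool.or_false]

lemma cfMarkBwd_getD (aft : List Bool) (j : Int) (i : Nat) (hi : i < aft.length) :
    (cfMarkBwd aft j).getD i false
      = (aft.getD i false || (decide (j - 1 = (i : Int)) || decide (j - 2 = (i : Int)))) := by
  unfold cfMarkBwd; dsimp only
  by_cases g1 : 0 ≤ j - 1 <;> by_cases g2 : 0 ≤ j - 2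
  · rw [if_pos g2, if_pos g1,
      getD_set_true' _ _ _ g2 (by rw [List.length_set]; exact hi),
      getD_set_true' _ _ _ g1 hi, Bool.or_assoc]
  · rw [if_neg g2, if_pos g1, getD_set_true' _ _ _ g1 hi]
    have : decide (j - 2 = (i : Int)) = false := by simp; omega
    rw [this, Bool.or_false]
  · omega
  · rw [if_neg g2, if_neg g1]
    have h1 : decide (j - 1 = (i : Int)) = false := by simp; omega
    have h2 : decide (j - 2 = (i : Int)) = false := by simp; omega
    rw [h1, h2, Bool.or_false, Bool.or_false]

lemma cfFold_getD (element : String) (n : Int) (ps : List (Int × String))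
    (s : List Bool × List Bool) (i : Nat)
    (h1 : (s.1.length : Int) = n) (h2 : (s.2.length : Int) = n) (hi : ((i : Int)) < n)
    (hp : ∀ p ∈ ps, 0 ≤ p.1) :
    ((ps.foldl (cfStep n element) s).1.getD i false
        = (s.1.getD i false
           || ps.any (fun p => decide (p.2 = element) && (decide (p.1 + 1 = (i : Int)) || decide (p.1 + 2 = (i : Int))))))
    ∧ ((ps.foldl (cfStep n element) s).2.getD i false
        = (s.2.getD i false
           || ps.any (fun p => decide (p.2 = element) && (decide (p.1 - 1 = (i : Int)) || decide (p.1 - 2 = (i : Int)))))) := by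
  induction ps generalizing s with
  | nil => simp
  | cons p ps ih =>
    have hp0 : 0 ≤ p.1 := hp p (List.mem_cons_self ..)
    have hlen1 : ((cfStep n element s p).1.length : Int) = n := by
      unfold cfStep; split_ifs <;> simp [length_cfMarkFwd, h1]
    have hlen2 : ((cfStep n element s p).2.length : Int) = n := by
      unfold cfStep; split_ifs <;> simp [length_cfMarkBwd, h2]
    obtain ⟨ihl, ihr⟩ := ih (cfStep n element s p) hlen1 hlen2
      (fun q hq => hp q (List.mem_cons_of_mem _ hq))
    rw [List.foldl_cons]
    constructor
    · rw [ihl, List.any_cons]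
      by_cases he : p.2 = element
      · rw [show (cfStep n element s p).1 = cfMarkFwd n s.1 p.1 from by simp [cfStep, he]]
        rw [cfMarkFwd_getD n s.1 p.1 i (by omega) (by omega) hp0]
        simp [he, Bool.or_assoc]
      · rw [show (cfStep n element s p).1 = s.1 from by simp [cfStep, he]]
        simp [he]
    · rw [ihr, List.any_cons]
      by_cases he : p.2 = element
      · rw [show (cfStep n element s p).2 = cfMarkBwd s.2 p.1 from by simp [cfStep, he]]
        rw [cfMarkBwd_getD s.2 p.1 i (by omega)]
        simp [he, Bool.or_assoc]
      · rw [show (cfStep n element s p).2 = s.2 from by simp [cfStep, he]]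
        simp [he]

lemma any_fwd_eq (phrase : List String) (element : String) (i : Nat) :
    (PySem.List.enumerate phrase).any
        (fun p => decide (p.2 = element) && (decide (p.1 + 1 = (i : Int)) || decide (p.1 + 2 = (i : Int))))
      = (PySem.Set.contains (cfPos phrase element) ((i : Int) - 2)
         || PySem.Set.contains (cfPos phrase element) ((i : Int) - 1)) := by
  rw [Bool.eq_iff_iff]
  simp only [List.any_eq_true, Bool.and_eq_true, Bool.or_eq_true, decide_eq_true_iff,
    PySem.Set.contains_iff, mem_cfPos, PySem.List.mem_enumerate_iff]
  constructor
  · rintro ⟨p, ⟨k, hk, rfl⟩, he, hcase⟩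
    rcases hcase with h | h
    · right; exact ⟨k, hk, by omega, he⟩
    · left; exact ⟨k, hk, by omega, he⟩
  · rintro (⟨k, hk, hke, he⟩ | ⟨k, hk, hke, he⟩)
    · exact ⟨((k : Int), phrase[k]), ⟨k, hk, by simp⟩, he, Or.inr (by omega)⟩
    · exact ⟨((k : Int), phrase[k]), ⟨k, hk, by simp⟩, he, Or.inl (by omega)⟩

lemma any_bwd_eq (phrase : List String) (element : String) (i : Nat) :
    (PySem.List.enumerate phrase).any
        (fun p => decide (p.2 = element) && (decide (p.1 - 1 = (i : Int)) || decide (p.1 - 2 = (i : Int))))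
      = (PySem.Set.contains (cfPos phrase element) ((i : Int) + 1)
         || PySem.Set.contains (cfPos phrase element) ((i : Int) + 2)) := by
  rw [Bool.eq_iff_iff]
  simp only [List.any_eq_true, Bool.and_eq_true, Bool.or_eq_true, decide_eq_true_iff,
    PySem.Set.contains_iff, mem_cfPos, PySem.List.mem_enumerate_iff]
  constructor
  · rintro ⟨p, ⟨k, hk, rfl⟩, he, hcase⟩
    rcases hcase with h | h
    · left; exact ⟨k, hk, by omega, he⟩
    · right; exact ⟨k, hk, by omega, he⟩
  · rintro (⟨k, hk, hke, he⟩ | ⟨k, hk, hke, he⟩)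
    · exact ⟨((k : Int), phrase[k]), ⟨k, hk, by simp⟩, he, Or.inl (by omega)⟩
    · exact ⟨((k : Int), phrase[k]), ⟨k, hk, by simp⟩, he, Or.inr (by omega)⟩

lemma getD_replicate_false (m i : Nat) : (List.replicate m false).getD i false = false := by
  rw [List.getD_eq_getElem?_getD, List.getElem?_replicate]
  split_ifs <;> rfl

lemma alt_eq_map (phrase : List String) (target_word : String) (element : String) :
    context_flags_with_direction_alt phrase target_word element
      = ((PySem.List.enumerate phrase).filter (fun p => p.2 = target_word)).map
          (fun p => cfFlag (cfPos phrase element) p.1) := by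
  unfold context_flags_with_direction_alt
  dsimp only
  apply List.map_congr_left
  intro p hp
  have hp' : p ∈ PySem.List.enumerate phrase := List.mem_of_mem_filter hp
  rw [PySem.List.mem_enumerate_iff] at hp'
  obtain ⟨k, hk, rfl⟩ := hp'
  have hnn : ∀ q ∈ PySem.List.enumerate phrase, 0 ≤ q.1 := by
    intro q hq
    rw [PySem.List.mem_enumerate_iff] at hq
    obtain ⟨m, hm, rfl⟩ := hq
    simp
  have hlen : (((List.replicate (PySem.List.len phrase).toNat false : List Bool).length : Int))
      = PySem.List.len phrase := by
    simp [PySem.List.len_eq]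
  obtain ⟨hfst, hsnd⟩ := cfFold_getD element (PySem.List.len phrase) (PySem.List.enumerate phrase)
    (List.replicate (PySem.List.len phrase).toNat false, List.replicate (PySem.List.len phrase).toNat false)
    k hlen hlen (by rw [PySem.List.len_eq]; omega) hnn
  have htn : ((0 : Int) + (k : Int)).toNat = k := by omega
  dsimp only at hfst hsnd ⊢
  rw [htn, hfst, hsnd]
  simp only [getD_replicate_false, Bool.false_or]
  rw [any_fwd_eq phrase element k, any_bwd_eq phrase element k,
    show ((0 : Int) + (k : Int)) = (k : Int) from by omega]
  unfold cfFlag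
  rfl

-- ===== VERDICT (by name: the statement is the Claim_ definition above) =====
theorem context_flags_with_direction_spec : Claim_equal_context_flags_with_direction := by
  intro phrase target_word element _
  unfold Spec_context_flags_with_direction
  rw [A_eq_filterMap]
  rw [List.filterMap_congr (emitA_eq phrase target_word element)]
  rw [filterMap_cfEmitB, alt_eq_map]
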